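-- pv_equiv track=rewrite | github.com/FrancisVega/navSingle | nav.py | getSlices
-- ===== SOURCE A (Python) =====
-- def getSlices(height, sliceSize):
--     height = int(height)
--     sliceSize = int(sliceSize)
--
--     sliceList = []
--     while height > 0:
--         if height > sliceSize:
--             sliceList.append(sliceSize)
--         else:
--             sliceList.append(height)
--         height -= sliceSize
--
--     return sliceList
-- ===== SOURCE B (Python) =====
-- def getSlices(height, sliceSize):
--     height = int(height)
--     sliceSize = int(sliceSize)
--     if height <= 0:
--         return []
--     q, r = divmod(height, sliceSize)
--     return [sliceSize] * q + ([r] if r > 0 else [])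
-- ===== Notes on version B (the rewrite author's own statement) =====
-- stated objective: simpler
-- what changed: Replaces the repeated-subtraction while loop with one divmod: q full slices of sliceSize plus the positive remainder; Pre_ excludes sliceSize <= 0 with height > 0, where A loops forever.
import Mathlib
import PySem

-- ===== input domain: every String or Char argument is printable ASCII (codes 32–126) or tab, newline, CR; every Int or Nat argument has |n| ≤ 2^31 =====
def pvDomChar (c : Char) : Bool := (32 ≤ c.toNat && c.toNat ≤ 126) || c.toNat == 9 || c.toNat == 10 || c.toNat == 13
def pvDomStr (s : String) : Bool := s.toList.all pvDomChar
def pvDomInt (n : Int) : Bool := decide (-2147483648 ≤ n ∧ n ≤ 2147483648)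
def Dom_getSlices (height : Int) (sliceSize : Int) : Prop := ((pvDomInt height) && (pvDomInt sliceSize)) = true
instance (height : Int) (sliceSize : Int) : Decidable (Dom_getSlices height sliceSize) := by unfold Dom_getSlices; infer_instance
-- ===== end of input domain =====

-- B replaces A's repeated-subtraction while loop by a single divmod and direct list construction (objective: simpler).

-- ===== PORT A =====
-- A's while loop; fuel = height.toNat bounds the iteration count whenever the loop
-- terminates (inside Pre_: sliceSize ≥ 1, so the loop runs at most height times).
def getSlicesLoop : Nat → Int → Int → List Int
  | 0, _, _ => []
  | f + 1, h, s => if h > 0 then (if h > s then s else h) :: getSlicesLoop f (h - s) s else []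

def getSlices (height : Int) (sliceSize : Int) : List Int :=
  getSlicesLoop height.toNat height sliceSize

-- ===== PORT B =====
def getSlices_alt (height : Int) (sliceSize : Int) : List Int :=
  if height ≤ 0 then []
  else
    let q := PySem.Int.floordiv height sliceSize
    let r := PySem.Int.mod height sliceSize
    List.replicate q.toNat sliceSize ++ (if r > 0 then [r] else [])

-- ===== PRECONDITION & SPEC =====
-- Pre_ excludes sliceSize ≤ 0 with height > 0: there A's while loop never terminates.
def Pre_getSlices (height : Int) (sliceSize : Int) : Prop := 0 < sliceSize ∨ height ≤ 0
instance (height : Int) (sliceSize : Int) : Decidable (Pre_getSlices height sliceSize) := by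
  unfold Pre_getSlices; infer_instance

def pvWitness_getSlices : Int × Int := (10, 3)

def Spec_getSlices (height : Int) (sliceSize : Int) (out : List Int) : Prop := out = getSlices_alt height sliceSize
instance (height : Int) (sliceSize : Int) (out : List Int) : Decidable (Spec_getSlices height sliceSize out) := by unfold Spec_getSlices; infer_instance

-- ===== CLAIM (what is proved, stated in full; the proofs are below) =====
def Claim_equal_getSlices : Prop := ∀ (height : Int) (sliceSize : Int), Dom_getSlices height sliceSize → Pre_getSlices height sliceSize → Spec_getSlices height sliceSize (getSlices height sliceSize)

-- ===== LEMMAS AND PROOFS =====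

lemma getSlices_alt_nonpos (h s : Int) (hh : h ≤ 0) : getSlices_alt h s = [] := by
  simp [getSlices_alt, hh]

lemma getSlicesLoop_eq_alt (s : Int) (hs : 0 < s) :
    ∀ (f : Nat) (h : Int), h ≤ (f : Int) → getSlicesLoop f h s = getSlices_alt h s := by
  intro f
  induction f with
  | zero =>
      intro h hf
      rw [getSlices_alt_nonpos h s (by exact_mod_cast hf)]
      rfl
  | succ f ih =>
      intro h hf
      by_cases hpos : h > 0
      · have hrec : getSlicesLoop (f + 1) h s
            = (if h > s then s else h) :: getSlicesLoop f (h - s) s := by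
          simp [getSlicesLoop, hpos]
        rw [hrec, ih (h - s) (by push_cast at hf ⊢; omega)]
        have hd : PySem.Int.floordiv h s = h / s := PySem.Int.floordiv_eq_ediv_of_pos (by omega)
        have hm : PySem.Int.mod h s = h % s := PySem.Int.mod_eq_emod_of_pos (by omega)
        by_cases hlt : h > s
        · -- peel one full slice of size s
          have hsub : h - s > 0 := by omega
          have hd' : PySem.Int.floordiv (h - s) s = (h - s) / s :=
            PySem.Int.floordiv_eq_ediv_of_pos (by omega)
          have hm' : PySem.Int.mod (h - s) s = (h - s) % s :=
            PySem.Int.mod_eq_emod_of_pos (by omega)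
          have hdiv : (h - s) / s = h / s - 1 := by
            have h1 : (h + (-1) * s) / s = h / s + (-1) :=
              Int.add_mul_ediv_right h (-1) (show s ≠ 0 by omega)
            have h2 : h - s = h + (-1) * s := by ring
            rw [h2, h1]; ring
          have hmod : (h - s) % s = h % s := by
            have h3 := Int.sub_mul_emod_self_left h s 1
            simp only [mul_one] at h3
            exact h3
          have hq1 : 1 ≤ h / s := by
            rw [Int.le_ediv_iff_mul_le hs]; omega
          have htn : (h / s).toNat = ((h - s) / s).toNat + 1 := by
            rw [hdiv]; omega
          simp only [getSlices_alt, hd, hm, hd', hm',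
            if_neg (show ¬ h ≤ 0 by omega), if_neg (show ¬ h - s ≤ 0 by omega),
            hdiv, hmod, hlt, if_true, htn]
          simp [List.replicate_succ]
        · -- last (partial or exact) slice: h ≤ s
          have hle : h ≤ s := by omega
          have hstop : getSlices_alt (h - s) s = [] :=
            getSlices_alt_nonpos _ _ (by omega)
          rw [hstop]
          by_cases heq : h = s
          · subst heq
            have : h / h = 1 := Int.ediv_self (by omega)
            simp [getSlices_alt, hd, hm, if_neg (show ¬ h ≤ 0 by omega), this]
          · have hlt' : h < s := by omega
            have hq0 : h / s = 0 := Int.ediv_eq_zero_of_lt (by omega) hlt'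
            have hr : h % s = h := Int.emod_eq_of_lt (by omega) hlt'
            simp [getSlices_alt, hd, hm, if_neg (show ¬ h ≤ 0 by omega), hq0, hr, hpos, hlt]
      · have hh : h ≤ 0 := by omega
        rw [getSlices_alt_nonpos h s hh]
        simp [getSlicesLoop, hpos]

-- ===== VERDICT (by name: the statement is the Claim_ definition above) =====
theorem getSlices_spec : Claim_equal_getSlices := by
  intro h s _ pre
  unfold Spec_getSlices getSlices
  rcases pre with hs | hh
  · exact getSlicesLoop_eq_alt s hs h.toNat h (Int.self_le_toNat h)
  · rw [getSlices_alt_nonpos h s hh]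
    have : h.toNat = 0 := by omega
    rw [this]; rfl
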